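-- pv_equiv track=rewrite | github.com/juwkim/boj | 백준/Silver/28395. Разделение прямоугольника/Разделение прямоугольника.py | solve
-- ===== SOURCE A (Python) =====
-- import math
--
-- def solve(a, b, k, m):
--     S = k + 2
--     D = S * S - 4 * m
--     if D < 0:
--         return -1,
--     r = math.isqrt(D)
--     if r * r != D or S + r & 1:
--         return -1,
--     x, y = S - r >> 1, S + r >> 1
--     if x <= 0 or y <= 0:
--         return -1,
--     return min([(p - 1, q - 1) for p, q in ((x, y), (y, x)) if p <= a and q <= b], default=(-1,))
-- ===== SOURCE B (Python) =====
-- import math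
--
-- def solve(a, b, k, m):
--     # B: factor m by trial division up to isqrt(m) instead of solving the quadratic
--     # discriminant; x, y (x <= y) are the side counts with x + y == k + 2, x * y == m.
--     S = k + 2
--     if m <= 0 or S <= 0:
--         return -1,
--     pair = None
--     for d in range(1, math.isqrt(m) + 1):
--         if m % d == 0 and d + m // d == S:
--             pair = (d, m // d)
--             break
--     if pair is None:
--         return -1,
--     x, y = pair
--     if x <= a and y <= b:
--         return x - 1, y - 1
--     if y <= a and x <= b:
--         return y - 1, x - 1
--     return -1,
-- ===== Notes on version B (the rewrite author's own statement) =====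
-- stated objective: alternative
-- what changed: B finds the side pair by trial-dividing m up to isqrt(m) (guarding m<=0 and S<=0 up front) instead of solving the quadratic via discriminant/perfect-square/parity checks, and replaces the min-over-filtered-orientations with an explicit if-chain exploiting x<=y.
import Mathlib
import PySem

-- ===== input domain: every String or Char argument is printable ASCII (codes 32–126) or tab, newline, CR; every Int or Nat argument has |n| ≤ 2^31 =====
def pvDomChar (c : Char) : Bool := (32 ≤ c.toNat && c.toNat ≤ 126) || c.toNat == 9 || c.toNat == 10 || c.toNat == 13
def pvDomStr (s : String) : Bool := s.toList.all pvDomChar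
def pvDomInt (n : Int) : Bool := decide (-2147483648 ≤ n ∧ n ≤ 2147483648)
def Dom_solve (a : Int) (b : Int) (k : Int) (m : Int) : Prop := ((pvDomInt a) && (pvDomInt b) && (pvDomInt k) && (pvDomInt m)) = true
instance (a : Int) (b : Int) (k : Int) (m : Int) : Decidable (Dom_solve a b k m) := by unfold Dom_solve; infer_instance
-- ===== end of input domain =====

-- B finds the side pair by trial division of m up to isqrt(m) instead of A's
-- discriminant/perfect-square quadratic formula; an alternative of similar size.

-- math.isqrt(n), ported by hand: exact for n ≥ 0 (every call site guards n ≥ 0).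
def pyIsqrt (n : Int) : Int := ((Int.toNat n).sqrt : Int)

-- ===== PORT A =====
def solve (a : Int) (b : Int) (k : Int) (m : Int) : List Int :=
  let S := k + 2
  let D := S * S - 4 * m
  if D < 0 then [-1]
  else
    let r := pyIsqrt D
    -- Python 'S + r & 1' parses as (S + r) & 1 and is truthy iff nonzero
    if r * r ≠ D ∨ PySem.Int.band (S + r) 1 ≠ 0 then [-1]
    else
      -- '>> 1' is an arithmetic shift = floor division by 2
      let x := PySem.Int.floordiv (S - r) 2
      let y := PySem.Int.floordiv (S + r) 2
      if x ≤ 0 ∨ y ≤ 0 then [-1]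
      else
        -- min([...], default=(-1,)): lexicographic tuple min, first minimum kept
        let cands := (([(x, y), (y, x)] : List (Int × Int)).filter
            (fun pq => decide (pq.1 ≤ a ∧ pq.2 ≤ b))).map (fun pq => (pq.1 - 1, pq.2 - 1))
        match cands with
        | [] => [-1]
        | h :: t =>
          let best := t.foldl
            (fun acc c => if c.1 < acc.1 ∨ (c.1 = acc.1 ∧ c.2 < acc.2) then c else acc) h
          [best.1, best.2]

-- ===== PORT B =====
def solve_alt (a : Int) (b : Int) (k : Int) (m : Int) : List Int :=
  let S := k + 2
  if m ≤ 0 ∨ S ≤ 0 then [-1]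
  else
    match (PySem.List.pyRange 1 (pyIsqrt m + 1) 1).findSome? (fun d =>
        if PySem.Int.mod m d = 0 ∧ d + PySem.Int.floordiv m d = S
        then some (d, PySem.Int.floordiv m d) else none) with
    | none => [-1]
    | some (x, y) =>
      if x ≤ a ∧ y ≤ b then [x - 1, y - 1]
      else if y ≤ a ∧ x ≤ b then [y - 1, x - 1]
      else [-1]

-- ===== PRECONDITION & SPEC =====
def Spec_solve (a : Int) (b : Int) (k : Int) (m : Int) (out : List Int) : Prop := out = solve_alt a b k m
instance (a : Int) (b : Int) (k : Int) (m : Int) (out : List Int) : Decidable (Spec_solve a b k m out) := by unfold Spec_solve; infer_instance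

-- ===== CLAIM (what is proved, stated in full; the proofs are below) =====
def Claim_equal_solve : Prop := ∀ (a : Int) (b : Int) (k : Int) (m : Int), Dom_solve a b k m → Spec_solve a b k m (solve a b k m)

-- ===== LEMMAS AND PROOFS =====

theorem pyIsqrt_nonneg (n : Int) : 0 ≤ pyIsqrt n := Int.natCast_nonneg _

theorem pyIsqrt_sq (t : Int) (ht : 0 ≤ t) : pyIsqrt (t * t) = t := by
  unfold pyIsqrt
  lift t to ℕ using ht
  rw [← Int.natCast_mul, Int.toNat_natCast, ← Nat.pow_two, Nat.sqrt_eq']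

theorem le_pyIsqrt {t n : Int} (ht : 0 ≤ t) (h : t * t ≤ n) : t ≤ pyIsqrt n := by
  have hn : 0 ≤ n := le_trans (mul_nonneg ht ht) h
  unfold pyIsqrt
  lift t to ℕ using ht
  lift n to ℕ using hn
  rw [Int.toNat_natCast]
  exact_mod_cast Nat.le_sqrt'.mpr (by rw [Nat.pow_two]; exact_mod_cast h)

theorem pyIsqrt_sq_le {n : Int} (hn : 0 ≤ n) : pyIsqrt n * pyIsqrt n ≤ n := by
  unfold pyIsqrt
  lift n to ℕ using hn
  rw [Int.toNat_natCast, ← Int.natCast_mul, ← Nat.pow_two]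
  exact_mod_cast Nat.sqrt_le' n

theorem floordiv_double (t : Int) : PySem.Int.floordiv (2 * t) 2 = t := by
  rw [PySem.Int.floordiv_eq_ediv_of_pos (by norm_num)]
  exact Int.mul_ediv_cancel_left t (by norm_num)

-- findSome? over a list with at most one hit returns that hit.
theorem findSome?_of_unique {α β : Type} (f : α → Option β) (l : List α) (x : α) (v : β)
    (hx : x ∈ l) (hfx : f x = some v) (huniq : ∀ d ∈ l, f d ≠ none → d = x) :
    l.findSome? f = some v := by
  induction l with
  | nil => cases hx
  | cons h t ih =>
    rw [List.findSome?_cons]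
    cases hfh : f h with
    | some w =>
      have hhx : h = x := huniq h (List.mem_cons_self ..) (by simp [hfh])
      rw [hhx, hfx] at hfh
      exact hfh.symm
    | none =>
      have hxt : x ∈ t := by
        rcases List.mem_cons.mp hx with rfl | h' 
        · rw [hfh] at hfx; cases hfx
        · exact h'
      exact ih hxt (fun d hd hne => huniq d (List.mem_cons_of_mem _ hd) hne)

-- roots of t² - S t + m are determined: any divisor pair summing to S is {x, y}
theorem root_factor {S m d x y : Int} (hsum : x + y = S) (hprod : x * y = m)
    (he : d * (S - d) = m) : d = x ∨ d = y := by
  have h0 : (d - x) * (d - y) = 0 := by linear_combination (-d) * hsum + hprod - he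
  rcases mul_eq_zero.mp h0 with h | h
  · left; omega
  · right; omega

-- A returns [-1] when no positive root pair exists
theorem solveA_no_root (a b k m : Int)
    (hnr : ¬ ∃ x y : Int, 0 < x ∧ x ≤ y ∧ x + y = k + 2 ∧ x * y = m) :
    solve a b k m = [-1] := by
  unfold solve
  by_cases hD : (k + 2) * (k + 2) - 4 * m < 0
  · simp [hD]
  · rw [if_neg hD]
    set S := k + 2 with hS
    set D := S * S - 4 * m with hDdef
    set r := pyIsqrt D with hr
    by_cases hc : r * r ≠ D ∨ PySem.Int.band (S + r) 1 ≠ 0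
    · simp only [if_pos hc]
    · rw [if_neg hc]
      push Not at hc
      obtain ⟨hr2, hband⟩ := hc
      rw [PySem.Int.band_one] at hband
      have hdvd : (2 : Int) ∣ (S + r) := (PySem.Int.mod_eq_zero_iff_dvd _ _).mp hband
      obtain ⟨y₀, hy₀⟩ := hdvd
      have hy : PySem.Int.floordiv (S + r) 2 = y₀ := by rw [hy₀]; exact floordiv_double y₀
      have hx' : S - r = 2 * (y₀ - r) := by omega
      have hx : PySem.Int.floordiv (S - r) 2 = y₀ - r := by rw [hx']; exact floordiv_double (y₀ - r)
      rw [hx, hy]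
      have hrn : 0 ≤ r := pyIsqrt_nonneg D
      have hr2' : r * r = S * S - 4 * m := by rw [hr2]
      have h4 : (4 : ℤ) * ((y₀ - r) * y₀) = 4 * m := by
        linear_combination (-1 : ℤ) * hr2' - (2 * y₀ - r + S) * hy₀
      have hprod : (y₀ - r) * y₀ = m := mul_left_cancel₀ (by norm_num : (4:ℤ) ≠ 0) h4
      have hsum : (y₀ - r) + y₀ = S := by omega
      rw [if_pos]
      by_contra hpos
      push Not at hpos
      exact hnr ⟨y₀ - r, y₀, by omega, by omega, hsum, hprod⟩

-- B returns [-1] when no positive root pair exists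
theorem solveB_no_root (a b k m : Int)
    (hnr : ¬ ∃ x y : Int, 0 < x ∧ x ≤ y ∧ x + y = k + 2 ∧ x * y = m) :
    solve_alt a b k m = [-1] := by
  unfold solve_alt
  by_cases hdeg : m ≤ 0 ∨ k + 2 ≤ 0
  · simp [hdeg]
  · rw [if_neg hdeg]
    push Not at hdeg
    obtain ⟨hm, hSpos⟩ := hdeg
    have hnone : (PySem.List.pyRange 1 (pyIsqrt m + 1) 1).findSome? (fun d =>
        if PySem.Int.mod m d = 0 ∧ d + PySem.Int.floordiv m d = k + 2
        then some (d, PySem.Int.floordiv m d) else none) = none := by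
      rw [List.findSome?_eq_none_iff]
      intro d hd
      rw [PySem.List.mem_pyRange_one] at hd
      rw [if_neg]
      intro ⟨hmod, hsum⟩
      have hd0 : 0 < d := by omega
      have hdvd : d ∣ m := (PySem.Int.mod_eq_zero_iff_dvd _ _).mp hmod
      have he : d * PySem.Int.floordiv m d = m := by
        rw [PySem.Int.floordiv_eq_ediv_of_pos hd0]
        exact Int.mul_ediv_cancel' hdvd
      set e := PySem.Int.floordiv m d with hedef
      have hdsq : d * d ≤ m := by
        have h1 : d ≤ pyIsqrt m := by omega
        have h2 : pyIsqrt m * pyIsqrt m ≤ m := pyIsqrt_sq_le (by omega)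
        nlinarith [pyIsqrt_nonneg m]
      have hde : d ≤ e := by nlinarith
      exact hnr ⟨d, e, hd0, hde, hsum, he⟩
    rw [hnone]

-- both sides at a positive root pair x₀ ≤ y₀
theorem solve_eq_root (a b k m x₀ y₀ : Int) (hx : 0 < x₀) (hxy : x₀ ≤ y₀)
    (hsum : x₀ + y₀ = k + 2) (hprod : x₀ * y₀ = m) :
    solve a b k m = solve_alt a b k m := by
  have hy : 0 < y₀ := by omega
  have hm : 0 < m := by nlinarith
  have hS : 0 < k + 2 := by omega
  -- A side
  have hD : (k + 2) * (k + 2) - 4 * m = (y₀ - x₀) * (y₀ - x₀) := by nlinarith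
  have hr : pyIsqrt ((k + 2) * (k + 2) - 4 * m) = y₀ - x₀ := by
    rw [hD]; exact pyIsqrt_sq _ (by omega)
  have hA : solve a b k m =
      (match (([((x₀ : Int), (y₀ : Int)), (y₀, x₀)].filter
            (fun pq => decide (pq.1 ≤ a ∧ pq.2 ≤ b))).map (fun pq => (pq.1 - 1, pq.2 - 1))) with
        | [] => [-1]
        | h :: t =>
          let best := t.foldl
            (fun acc c => if c.1 < acc.1 ∨ (c.1 = acc.1 ∧ c.2 < acc.2) then c else acc) h
          [best.1, best.2] : List Int) := by
    unfold solve
    rw [if_neg (by rw [hD]; exact not_lt.mpr (mul_self_nonneg _) : ¬ (k + 2) * (k + 2) - 4 * m < 0)]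
    rw [hr]
    rw [if_neg (by
      push Not
      constructor
      · nlinarith
      · rw [PySem.Int.band_one]
        exact (PySem.Int.mod_eq_zero_iff_dvd _ _).mpr ⟨y₀, by omega⟩)]
    have h1 : PySem.Int.floordiv (k + 2 - (y₀ - x₀)) 2 = x₀ := by
      rw [(by omega : k + 2 - (y₀ - x₀) = 2 * x₀)]; exact floordiv_double x₀
    have h2 : PySem.Int.floordiv (k + 2 + (y₀ - x₀)) 2 = y₀ := by
      rw [(by omega : k + 2 + (y₀ - x₀) = 2 * y₀)]; exact floordiv_double y₀
    rw [h1, h2]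
    rw [if_neg (by omega : ¬ (x₀ ≤ 0 ∨ y₀ ≤ 0))]
  -- B side
  have hfound : (PySem.List.pyRange 1 (pyIsqrt m + 1) 1).findSome? (fun d =>
      if PySem.Int.mod m d = 0 ∧ d + PySem.Int.floordiv m d = k + 2
      then some (d, PySem.Int.floordiv m d) else none) = some (x₀, y₀) := by
    have hfdiv : PySem.Int.floordiv m x₀ = y₀ := by
      rw [PySem.Int.floordiv_eq_ediv_of_pos hx, ← hprod]
      exact Int.mul_ediv_cancel_left y₀ (by omega)
    apply findSome?_of_unique _ _ x₀ (x₀, y₀)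
    · rw [PySem.List.mem_pyRange_one]
      refine ⟨by omega, ?_⟩
      have : x₀ ≤ pyIsqrt m := le_pyIsqrt (by omega) (by nlinarith)
      omega
    · rw [if_pos ⟨(PySem.Int.mod_eq_zero_iff_dvd _ _).mpr ⟨y₀, hprod.symm⟩, by rw [hfdiv]; omega⟩, hfdiv]
    · intro d hd hne
      rw [PySem.List.mem_pyRange_one] at hd
      have hd0 : 0 < d := by omega
      by_cases hp : PySem.Int.mod m d = 0 ∧ d + PySem.Int.floordiv m d = k + 2
      · obtain ⟨hmod, hsd⟩ := hp
        have hdvd : d ∣ m := (PySem.Int.mod_eq_zero_iff_dvd _ _).mp hmod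
        have he : d * PySem.Int.floordiv m d = m := by
          rw [PySem.Int.floordiv_eq_ediv_of_pos hd0]
          exact Int.mul_ediv_cancel' hdvd
        have hEq : PySem.Int.floordiv m d = k + 2 - d := by omega
        rw [hEq] at he
        rcases root_factor hsum hprod he with h | h
        · exact h
        · -- d = y₀ but d ≤ isqrt m forces x₀ = y₀
          have hdsq : d * d ≤ m := by
            have h2 : pyIsqrt m * pyIsqrt m ≤ m := pyIsqrt_sq_le (by omega)
            nlinarith [pyIsqrt_nonneg m]
          subst h
          nlinarith
      · exact absurd (if_neg hp) hne
  have hB : solve_alt a b k m =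
      (if x₀ ≤ a ∧ y₀ ≤ b then [x₀ - 1, y₀ - 1]
       else if y₀ ≤ a ∧ x₀ ≤ b then [y₀ - 1, x₀ - 1]
       else [-1] : List Int) := by
    unfold solve_alt
    rw [if_neg (by omega : ¬ (m ≤ 0 ∨ k + 2 ≤ 0))]
    rw [hfound]
  rw [hA, hB]
  -- final stage: evaluate A's min over the filtered two-element list
  by_cases c1 : x₀ ≤ a ∧ y₀ ≤ b <;> by_cases c2 : y₀ ≤ a ∧ x₀ ≤ b
  · rw [if_pos c1]
    have e1 : (decide (x₀ ≤ a ∧ y₀ ≤ b)) = true := by simp [c1]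
    have e2 : (decide (y₀ ≤ a ∧ x₀ ≤ b)) = true := by simp [c2]
    simp only [List.filter_cons, List.filter_nil, e1, e2, if_true, List.map_cons,
      List.map_nil, List.foldl_cons, List.foldl_nil]
    rw [if_neg (by omega : ¬ ((y₀, x₀).1 - 1 < (x₀, y₀).1 - 1 ∨
      ((y₀, x₀).1 - 1 = (x₀, y₀).1 - 1 ∧ (y₀, x₀).2 - 1 < (x₀, y₀).2 - 1)))]
  · rw [if_pos c1]
    have e1 : (decide (x₀ ≤ a ∧ y₀ ≤ b)) = true := by simp [c1]
    have e2 : (decide (y₀ ≤ a ∧ x₀ ≤ b)) = false := by simpa using c2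
    simp only [List.filter_cons, List.filter_nil, e1, e2, if_true, Bool.false_eq_true,
      if_false, List.map_cons, List.map_nil, List.foldl_nil]
  · rw [if_neg c1, if_pos c2]
    have e1 : (decide (x₀ ≤ a ∧ y₀ ≤ b)) = false := by simpa using c1
    have e2 : (decide (y₀ ≤ a ∧ x₀ ≤ b)) = true := by simp [c2]
    simp only [List.filter_cons, List.filter_nil, e1, e2, if_true, Bool.false_eq_true,
      if_false, List.map_cons, List.map_nil, List.foldl_nil]
  · rw [if_neg c1, if_neg c2]
    have e1 : (decide (x₀ ≤ a ∧ y₀ ≤ b)) = false := by simpa using c1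
    have e2 : (decide (y₀ ≤ a ∧ x₀ ≤ b)) = false := by simpa using c2
    simp only [List.filter_cons, List.filter_nil, e1, e2, Bool.false_eq_true,
      if_false, List.map_nil]

theorem solve_eq (a b k m : Int) : solve a b k m = solve_alt a b k m := by
  by_cases hex : ∃ x y : Int, 0 < x ∧ x ≤ y ∧ x + y = k + 2 ∧ x * y = m
  · obtain ⟨x₀, y₀, hx, hxy, hsum, hprod⟩ := hex
    exact solve_eq_root a b k m x₀ y₀ hx hxy hsum hprod
  · rw [solveA_no_root a b k m hex, solveB_no_root a b k m hex]

-- ===== VERDICT (by name: the statement is the Claim_ definition above) =====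
theorem solve_spec : Claim_equal_solve := by
  intro a b k m _
  unfold Spec_solve
  exact solve_eq a b k m
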